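-- pv_equiv track=rewrite | github.com/Slncr/zapis-vrachi | app/schedule_compute.py | pick_ticket_for_busy
-- ===== SOURCE A (Python) =====
-- def time_to_minutes(hhmm: str) -> int:
--     try:
--         hh, mm = hhmm.split(":")[:2]
--         return int(hh) * 60 + int(mm)
--     except (ValueError, IndexError):
--         return -1
--
-- def pick_ticket_for_busy(
--     busy_start: str,
--     busy_end: str,
--     tickets: list[dict[str, str]],
-- ) -> tuple[str, str]:
--     bs = time_to_minutes(busy_start)
--     be = time_to_minutes(busy_end) if busy_end else bs + 1
--     for t in tickets:
--         ts = time_to_minutes(t.get("time") or "")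
--         if ts < 0:
--             continue
--         if bs <= ts < be:
--             return (t.get("fio") or "", t.get("service") or "")
--     for t in tickets:
--         if (t.get("time") or "") == busy_start:
--             return (t.get("fio") or "", t.get("service") or "")
--     return ("", "")
-- ===== SOURCE B (Python) =====
-- def time_to_minutes(hhmm: str) -> int:
--     try:
--         hh, mm = hhmm.split(":")[:2]
--         return int(hh) * 60 + int(mm)
--     except (ValueError, IndexError):
--         return -1
--
-- def pick_ticket_for_busy(
--     busy_start: str,
--     busy_end: str,
--     tickets: list[dict[str, str]],
-- ) -> tuple[str, str]:
--     bs = time_to_minutes(busy_start)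
--     be = time_to_minutes(busy_end) if busy_end else bs + 1
--     fallback = None
--     for t in tickets:
--         ts = time_to_minutes(t.get("time") or "")
--         if ts >= 0 and bs <= ts < be:
--             return (t.get("fio") or "", t.get("service") or "")
--         if fallback is None and (t.get("time") or "") == busy_start:
--             fallback = (t.get("fio") or "", t.get("service") or "")
--     return fallback if fallback is not None else ("", "")
-- ===== Notes on version B (the rewrite author's own statement) =====
-- stated objective: simpler
-- what changed: The two sequential scans over tickets are fused into one pass that early-returns on an interval match and keeps the first exact-string match as a saved fallback, returned only after the whole list is scanned.
import Mathlib
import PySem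

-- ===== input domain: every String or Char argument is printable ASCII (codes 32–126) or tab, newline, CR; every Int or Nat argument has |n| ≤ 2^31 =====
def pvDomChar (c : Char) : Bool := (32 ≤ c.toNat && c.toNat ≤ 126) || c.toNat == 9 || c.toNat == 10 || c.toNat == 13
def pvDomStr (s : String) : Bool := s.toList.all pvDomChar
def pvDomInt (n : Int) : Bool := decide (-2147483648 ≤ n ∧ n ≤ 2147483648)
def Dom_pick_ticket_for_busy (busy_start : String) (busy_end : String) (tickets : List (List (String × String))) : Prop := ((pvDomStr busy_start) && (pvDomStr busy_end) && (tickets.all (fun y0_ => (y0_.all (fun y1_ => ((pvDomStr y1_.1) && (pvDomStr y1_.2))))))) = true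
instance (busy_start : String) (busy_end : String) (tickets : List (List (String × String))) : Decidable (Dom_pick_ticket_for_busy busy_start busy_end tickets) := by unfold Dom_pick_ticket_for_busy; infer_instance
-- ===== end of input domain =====

-- B fuses A's two sequential scans into one pass with a saved first-exact-match fallback; objective: simpler (same O(n) cost).

-- ===== PORT A =====
-- shared module helper: hh, mm = hhmm.split(":")[:2]; int(hh)*60+int(mm); -1 on ValueError/IndexError
def time_to_minutes (hhmm : String) : Int :=
  match (PySem.Str.split? hhmm ":").getD [] with   -- sep ":" ≠ "", so split? is always some
  | hh :: mm :: _ =>          -- [:2] then unpack: succeeds iff ≥ 2 pieces, taking the first two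
    match PySem.Int.ofStr? hh, PySem.Int.ofStr? mm with
    | some h, some m => h * 60 + m
    | _, _ => -1              -- int() raised ValueError
  | _ => -1                   -- unpack raised ValueError

-- (t.get(k) or "") : missing key or empty value both give ""
def tget (t : List (String × String)) (k : String) : String := PySem.Dict.getD ⟨t⟩ k ""

def pickA_loop1 (bs be : Int) : List (List (String × String)) → Option (String × String)
  | [] => none
  | t :: rest =>
    let ts := time_to_minutes (tget t "time")
    if ts < 0 then pickA_loop1 bs be rest
    else if bs ≤ ts ∧ ts < be then some (tget t "fio", tget t "service")
    else pickA_loop1 bs be rest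

def pickA_loop2 (busy_start : String) : List (List (String × String)) → Option (String × String)
  | [] => none
  | t :: rest =>
    if tget t "time" = busy_start then some (tget t "fio", tget t "service")
    else pickA_loop2 busy_start rest

def pick_ticket_for_busy (busy_start : String) (busy_end : String) (tickets : List (List (String × String))) : String × String :=
  let bs := time_to_minutes busy_start
  let be := if busy_end ≠ "" then time_to_minutes busy_end else bs + 1
  match pickA_loop1 bs be tickets with
  | some r => r
  | none =>
    match pickA_loop2 busy_start tickets with
    | some r => r
    | none => ("", "")

-- ===== PORT B =====
def pickB_loop (busy_start : String) (bs be : Int) (fb : Option (String × String)) :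
    List (List (String × String)) → String × String
  | [] => fb.getD ("", "")
  | t :: rest =>
    let ts := time_to_minutes (tget t "time")
    if 0 ≤ ts ∧ bs ≤ ts ∧ ts < be then (tget t "fio", tget t "service")
    else
      let fb' := if fb.isNone ∧ tget t "time" = busy_start
                 then some (tget t "fio", tget t "service") else fb
      pickB_loop busy_start bs be fb' rest

def pick_ticket_for_busy_alt (busy_start : String) (busy_end : String) (tickets : List (List (String × String))) : String × String :=
  let bs := time_to_minutes busy_start
  let be := if busy_end ≠ "" then time_to_minutes busy_end else bs + 1
  pickB_loop busy_start bs be none tickets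

-- ===== PRECONDITION & SPEC =====
def Spec_pick_ticket_for_busy (busy_start : String) (busy_end : String) (tickets : List (List (String × String))) (out : String × String) : Prop := out = pick_ticket_for_busy_alt busy_start busy_end tickets
instance (busy_start : String) (busy_end : String) (tickets : List (List (String × String))) (out : String × String) : Decidable (Spec_pick_ticket_for_busy busy_start busy_end tickets out) := by unfold Spec_pick_ticket_for_busy; infer_instance

-- ===== CLAIM (what is proved, stated in full; the proofs are below) =====
def Claim_equal_pick_ticket_for_busy : Prop := ∀ (busy_start : String) (busy_end : String) (tickets : List (List (String × String))), Dom_pick_ticket_for_busy busy_start busy_end tickets → Spec_pick_ticket_for_busy busy_start busy_end tickets (pick_ticket_for_busy busy_start busy_end tickets)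

-- ===== LEMMAS AND PROOFS =====
-- invariant: the fused loop with fallback fb = interval scan first, then fb, then the exact-match scan
theorem pickB_loop_eq (busy_start : String) (bs be : Int)
    (fb : Option (String × String)) (ts : List (List (String × String))) :
    pickB_loop busy_start bs be fb ts =
      match pickA_loop1 bs be ts with
      | some r => r
      | none =>
        match fb with
        | some f => f
        | none => (pickA_loop2 busy_start ts).getD ("", "") := by
  induction ts generalizing fb with
  | nil => cases fb <;> simp [pickB_loop, pickA_loop1, pickA_loop2]
  | cons t rest ih =>
    simp only [pickB_loop, pickA_loop1, pickA_loop2]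
    by_cases h0 : time_to_minutes (tget t "time") < 0
    · have hB : ¬ (0 ≤ time_to_minutes (tget t "time") ∧
        bs ≤ time_to_minutes (tget t "time") ∧ time_to_minutes (tget t "time") < be) := by
        intro h; omega
      rw [if_neg hB, if_pos h0, ih]
      cases fb with
      | some f => simp
      | none =>
        simp only [Option.isNone_none, true_and]
        by_cases hm : tget t "time" = busy_start
        · rw [if_pos hm, if_pos hm]
          cases pickA_loop1 bs be rest <;> simp
        · rw [if_neg hm, if_neg hm]
    · rw [if_neg h0]
      by_cases h1 : bs ≤ time_to_minutes (tget t "time") ∧ time_to_minutes (tget t "time") < be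
      · have hB : (0 ≤ time_to_minutes (tget t "time") ∧
          bs ≤ time_to_minutes (tget t "time") ∧ time_to_minutes (tget t "time") < be) :=
          ⟨by omega, h1⟩
        rw [if_pos hB, if_pos h1]
      · have hB : ¬ (0 ≤ time_to_minutes (tget t "time") ∧
          bs ≤ time_to_minutes (tget t "time") ∧ time_to_minutes (tget t "time") < be) := by
          intro h; exact h1 h.2
        rw [if_neg hB, if_neg h1, ih]
        cases fb with
        | some f => simp
        | none =>
          simp only [Option.isNone_none, true_and]
          by_cases hm : tget t "time" = busy_start
          · rw [if_pos hm, if_pos hm]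
            cases pickA_loop1 bs be rest <;> simp
          · rw [if_neg hm, if_neg hm]

-- ===== VERDICT (by name: the statement is the Claim_ definition above) =====
theorem pick_ticket_for_busy_spec : Claim_equal_pick_ticket_for_busy := by
  intro busy_start busy_end tickets _
  show pick_ticket_for_busy busy_start busy_end tickets = pick_ticket_for_busy_alt busy_start busy_end tickets
  simp only [pick_ticket_for_busy, pick_ticket_for_busy_alt]
  rw [pickB_loop_eq]
  cases pickA_loop1 (time_to_minutes busy_start)
      (if busy_end ≠ "" then time_to_minutes busy_end else time_to_minutes busy_start + 1) tickets with
  | some r => rfl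
  | none =>
    cases pickA_loop2 busy_start tickets with
    | some r => rfl
    | none => rfl
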